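-- pv_equiv track=rewrite | github.com/kdavjd/liquid_vapor_database | src/page_data.py | assign_table_numbers
-- ===== SOURCE A (Python) =====
-- def assign_table_numbers(region_series):
--     table_number = 0
--     table_numbers = []
--     last_region = None
--     for region in region_series:
--         if last_region == 'value' and region == 'metadata':
--             table_number += 1
--         table_numbers.append(table_number)
--         last_region = region
--     return table_numbers
-- ===== SOURCE B (Python) =====
-- def assign_table_numbers(region_series):
--     seq = list(region_series)
--     for i, (prev, cur) in enumerate(zip(seq, seq[1:]), 1):
--         if prev == 'value' and cur == 'metadata':
--             return [0] * i + [t + 1 for t in assign_table_numbers(seq[i:])]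
--     return [0] * len(seq)
-- ===== Notes on version B (the rewrite author's own statement) =====
-- stated objective: alternative
-- what changed: Replaces A's single stateful pass (running counter + last_region variable) with a recursive divide-and-shift algorithm: locate the first value->metadata boundary, emit zeros before it, recurse on the suffix and add 1 to every number from the recursion.
import Mathlib
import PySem

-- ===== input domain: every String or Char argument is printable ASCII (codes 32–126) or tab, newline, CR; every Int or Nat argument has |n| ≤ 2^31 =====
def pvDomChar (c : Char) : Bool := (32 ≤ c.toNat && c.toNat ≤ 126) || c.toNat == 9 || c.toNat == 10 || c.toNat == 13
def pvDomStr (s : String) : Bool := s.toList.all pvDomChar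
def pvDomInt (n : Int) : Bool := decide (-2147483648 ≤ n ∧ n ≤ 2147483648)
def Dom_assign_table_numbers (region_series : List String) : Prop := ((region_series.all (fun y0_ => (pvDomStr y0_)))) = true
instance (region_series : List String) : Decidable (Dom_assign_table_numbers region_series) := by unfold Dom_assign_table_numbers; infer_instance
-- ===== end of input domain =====

-- B replaces A's single stateful pass (running counter + last_region) by a recursive divide-and-shift
-- algorithm: find the FIRST value→metadata boundary, emit zeros before it, recurse on the suffix and
-- add 1 to each recursive result; same values, same cost (alternative decomposition).

-- ===== PORT A =====
-- A's loop: state is (table_number, last_region); each step emits the updated table_number.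
def assignLoopA (table_number : Int) (last_region : Option String) : List String → List Int
  | [] => []
  | region :: rest =>
    let t := if last_region == some "value" && region == "metadata" then table_number + 1 else table_number
    t :: assignLoopA t (some region) rest

def assign_table_numbers (region_series : List String) : List Int :=
  assignLoopA 0 none region_series

-- ===== PORT B =====
-- Source B's for-loop over enumerate(zip(seq, seq[1:]), 1): find the index of the first
-- value→metadata boundary (the loop's only effect is the early return at that index).
def findBoundary (i : Int) : List (String × String) → Option Int
  | [] => none
  | (prev, cur) :: z =>
    if prev == "value" && cur == "metadata" then some i else findBoundary (i + 1) z

-- range of the index findBoundary can return (cited by the port's decreasing_by)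
theorem findBoundary_bounds (z : List (String × String)) : ∀ (j i : Int),
    findBoundary j z = some i → j ≤ i ∧ i < j + z.length := by
  induction z with
  | nil => intro j i h; simp [findBoundary] at h
  | cons p z ih =>
    intro j i h
    by_cases hc : (p.1 == "value" && p.2 == "metadata") = true
    · simp only [findBoundary, hc, if_true, Option.some.injEq] at h
      subst h
      simp only [List.length_cons]
      push_cast
      omega
    · simp only [findBoundary, hc, Bool.false_eq_true, if_false] at h
      have := ih (j + 1) i h
      simp only [List.length_cons]
      push_cast at this ⊢
      omega

-- seq[i:] = drop for a nonnegative start (cited by the port's decreasing_by)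
theorem slice_from_nonneg {α : Type} (xs : List α) (i : Int) (h : 0 ≤ i) :
    PySem.List.slice xs (some i) none = xs.drop i.toNat := by
  have hi : i = ((i.toNat : Nat) : Int) := (Int.toNat_of_nonneg h).symm
  conv_lhs => rw [hi]
  rw [PySem.List.slice_from_natCast]

def assign_table_numbers_alt (region_series : List String) : List Int :=
  match h : findBoundary 1 (region_series.zip region_series.tail) with
  | none => List.replicate region_series.length 0
  | some i =>
    List.replicate i.toNat 0 ++
      (assign_table_numbers_alt (PySem.List.slice region_series (some i) none)).map (fun t => t + 1)
termination_by region_series.length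
decreasing_by
  have hb := findBoundary_bounds _ _ _ h
  have hz : (region_series.zip region_series.tail).length
      = min region_series.length region_series.tail.length := List.length_zip
  have hlt : region_series.tail.length = region_series.length - 1 := List.length_tail
  rw [slice_from_nonneg _ _ (by omega)]
  simp only [List.length_drop]
  omega

-- ===== PRECONDITION & SPEC =====
def Spec_assign_table_numbers (region_series : List String) (out : List Int) : Prop := out = assign_table_numbers_alt region_series
instance (region_series : List String) (out : List Int) : Decidable (Spec_assign_table_numbers region_series out) := by unfold Spec_assign_table_numbers; infer_instance

-- ===== CLAIM (what is proved, stated in full; the proofs are below) =====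
def Claim_equal_assign_table_numbers : Prop := ∀ (region_series : List String), Dom_assign_table_numbers region_series → Spec_assign_table_numbers region_series (assign_table_numbers region_series)

-- ===== LEMMAS AND PROOFS =====

-- shifting the counter shifts every output
theorem assignLoopA_shift (rs : List String) : ∀ (t : Int) (last : Option String),
    assignLoopA (t + 1) last rs = (assignLoopA t last rs).map (fun x => x + 1) := by
  induction rs with
  | nil => intro t last; simp [assignLoopA]
  | cons r rs ih =>
    intro t last
    by_cases hc : (last == some "value" && r == "metadata") = true <;>
      simp [assignLoopA, hc, ih]

-- no boundary in the whole suffix ⇒ the counter never moves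
theorem assignLoopA_noBoundary (rest : List String) : ∀ (r : String) (j t : Int),
    findBoundary j ((r :: rest).zip rest) = none →
    assignLoopA t (some r) rest = List.replicate rest.length t := by
  induction rest with
  | nil => intro r j t _; simp [assignLoopA]
  | cons c rs ih =>
    intro r j t h
    by_cases hc : (r == "value" && c == "metadata") = true
    · simp [findBoundary, hc] at h
    · simp only [List.zip_cons_cons, findBoundary, hc] at h
      simp only [assignLoopA, Option.some_beq_some, hc]
      simp only [Bool.false_eq_true, if_false, List.length_cons, List.replicate_succ]
      exact congrArg (t :: ·) (ih c (j + 1) t h)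

-- first boundary at index i ⇒ zeros (counter t) up to it, and the suffix starts with "metadata"
-- after a "value"
theorem assignLoopA_boundary (rest : List String) : ∀ (r : String) (j t i : Int),
    findBoundary j ((r :: rest).zip rest) = some i →
    assignLoopA t (some r) rest
      = List.replicate (i - j).toNat t
        ++ assignLoopA t (some "value") (rest.drop (i - j).toNat)
      ∧ (rest.drop (i - j).toNat).head? = some "metadata" := by
  induction rest with
  | nil => intro r j t i h; simp [findBoundary] at h
  | cons c rs ih =>
    intro r j t i h
    by_cases hc : (r == "value" && c == "metadata") = true
    · simp only [List.zip_cons_cons, findBoundary, hc, if_true, Option.some.injEq] at h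
      subst h
      have hr : r = "value" := by
        have := (Bool.and_eq_true _ _).mp hc
        exact beq_iff_eq.mp this.1
      have hcm : c = "metadata" := by
        have := (Bool.and_eq_true _ _).mp hc
        exact beq_iff_eq.mp this.2
      subst hr; subst hcm
      simp
    · simp only [List.zip_cons_cons, findBoundary, hc, Bool.false_eq_true] at h
      have hge := findBoundary_bounds _ _ _ h
      obtain ⟨ih1, ih2⟩ := ih c (j + 1) t i h
      have htn : (i - j).toNat = (i - (j + 1)).toNat + 1 := by omega
      constructor
      · simp only [assignLoopA, Option.some_beq_some, hc, Bool.false_eq_true, if_false]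
        rw [htn]
        simp only [List.replicate_succ, List.drop_succ_cons, List.cons_append]
        exact congrArg (t :: ·) ih1
      · rw [htn]; simpa using ih2

-- unfolding equations for the well-founded port of B
theorem alt_none (seq : List String) (h : findBoundary 1 (seq.zip seq.tail) = none) :
    assign_table_numbers_alt seq = List.replicate seq.length 0 := by
  rw [assign_table_numbers_alt]
  split
  · rfl
  · rename_i i h'; rw [h] at h'; cases h'

theorem alt_some (seq : List String) (i : Int)
    (h : findBoundary 1 (seq.zip seq.tail) = some i) :
    assign_table_numbers_alt seq
      = List.replicate i.toNat 0 ++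
          (assign_table_numbers_alt (PySem.List.slice seq (some i) none)).map (fun t => t + 1) := by
  rw [assign_table_numbers_alt]
  split
  · rename_i h'; rw [h] at h'; cases h'
  · rename_i i' h'; rw [h] at h'; injection h' with hi; subst hi; rfl

theorem A_eq_alt : ∀ (n : Nat) (seq : List String), seq.length ≤ n →
    assignLoopA 0 none seq = assign_table_numbers_alt seq := by
  intro n
  induction n with
  | zero =>
    intro seq hlen
    have : seq = [] := List.eq_nil_of_length_eq_zero (Nat.le_zero.mp hlen)
    subst this
    rw [alt_none [] (by simp [findBoundary])]
    simp [assignLoopA]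
  | succ n ih =>
    intro seq hlen
    cases hf : findBoundary 1 (seq.zip seq.tail) with
    | none =>
      rw [alt_none seq hf]
      cases seq with
      | nil => simp [assignLoopA]
      | cons r rest =>
        have h0 : assignLoopA 0 none (r :: rest) = 0 :: assignLoopA 0 (some r) rest := by
          simp [assignLoopA]
        rw [h0, assignLoopA_noBoundary rest r 1 0 (by simpa using hf)]
        simp [List.replicate_succ]
    | some i =>
      rw [alt_some seq i hf]
      cases seq with
      | nil => simp [findBoundary] at hf
      | cons r rest =>
        have hb := findBoundary_bounds _ _ _ hf
        have hz : ((r :: rest).zip (r :: rest).tail).length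
            = min (r :: rest).length (r :: rest).tail.length := List.length_zip
        have hi1 : 1 ≤ i := by omega
        obtain ⟨h1, h2⟩ := assignLoopA_boundary rest r 1 0 i (by simpa using hf)
        -- the suffix rest.drop (i-1).toNat starts with "metadata"
        obtain ⟨rs, hrs⟩ : ∃ rs, rest.drop (i - 1).toNat = "metadata" :: rs := by
          cases hd : rest.drop (i - 1).toNat with
          | nil => rw [hd] at h2; simp at h2
          | cons m rs =>
            rw [hd] at h2; simp at h2
            exact ⟨rs, by rw [h2]⟩
        have hdropseq : PySem.List.slice (r :: rest) (some i) none = "metadata" :: rs := by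
          rw [slice_from_nonneg _ _ (by omega)]
          have : i.toNat = (i - 1).toNat + 1 := by omega
          rw [this, List.drop_succ_cons, hrs]
        -- recursive call: IH applies since the suffix is shorter
        have hlen' : ("metadata" :: rs).length ≤ n := by
          have := congrArg List.length hrs
          simp only [List.length_drop, List.length_cons] at this ⊢
          simp only [List.length_cons, List.length_tail] at hz hlen
          omega
        have hrec := ih ("metadata" :: rs) hlen'
        -- assemble
        have h0 : assignLoopA 0 none (r :: rest) = 0 :: assignLoopA 0 (some r) rest := by
          simp [assignLoopA]
        rw [h0, h1, hrs, hdropseq, ← hrec]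
        have hm : assignLoopA 0 (some "value") ("metadata" :: rs)
            = 1 :: assignLoopA 1 (some "metadata") rs := by
          simp [assignLoopA]
        have hm0 : assignLoopA 0 none ("metadata" :: rs)
            = 0 :: assignLoopA 0 (some "metadata") rs := by
          simp [assignLoopA]
        rw [hm, hm0]
        have hsh : assignLoopA (0 + 1) (some "metadata") rs
            = (assignLoopA 0 (some "metadata") rs).map (fun x => x + 1) :=
          assignLoopA_shift rs 0 (some "metadata")
        simp only [zero_add] at hsh
        rw [hsh]
        have hrep : List.replicate i.toNat (0 : Int) = 0 :: List.replicate (i - 1).toNat 0 := by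
          have : i.toNat = (i - 1).toNat + 1 := by omega
          rw [this, List.replicate_succ]
        rw [hrep]
        simp

-- ===== VERDICT (by name: the statement is the Claim_ definition above) =====
theorem assign_table_numbers_spec : Claim_equal_assign_table_numbers := by
  intro seq _
  unfold Spec_assign_table_numbers assign_table_numbers
  exact A_eq_alt seq.length seq (le_refl _)
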